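-- pv_equiv track=rewrite | github.com/nico-fernandez/parser-py | Terminals/ACCEPT.py | ACCEPT_automata
-- ===== SOURCE A (Python) =====
-- TRAP_STATE = -1
--
-- RESULT_TRAP = "RESULT_TRAP"
--
-- RESULT_ACCEPTED = "ACCEPTED"
--
-- RESULT_NOT_ACCEPTED = "NOT ACCEPTED"
--
-- def ACCEPT_delta(state, character):
--     if state == 0 and character == "a":
--         return 1
--     if state == 1 and character == "c":
--         return 2
--     if state == 2 and character == "c":
--         return 3
--     if state == 3 and character == "e":
--         return 4
--     if state == 4 and character == "p":
--         return 5
--     if state == 5 and character == "t":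
--         return 6
--     return TRAP_STATE
--
-- def ACCEPT_automata(string):
--     finals = [6]
--     state = 0
--
--     for character in string:
--         next_state = ACCEPT_delta(state, character)
--         state = next_state
--
--     if state in finals:
--         return RESULT_ACCEPTED
--     if state == TRAP_STATE:
--         return RESULT_TRAP
--     return RESULT_NOT_ACCEPTED
-- ===== SOURCE B (Python) =====
-- RESULT_TRAP = "RESULT_TRAP"
-- RESULT_ACCEPTED = "ACCEPTED"
-- RESULT_NOT_ACCEPTED = "NOT ACCEPTED"
--
-- def ACCEPT_automata(string):
--     target = list("accept")
--     chars = list(string)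
--     if chars == target:
--         return RESULT_ACCEPTED
--     if target[:len(chars)] == chars:
--         return RESULT_NOT_ACCEPTED
--     return RESULT_TRAP
-- ===== Notes on version B (the rewrite author's own statement) =====
-- stated objective: simpler
-- what changed: Replaces the per-character DFA transition loop (ACCEPT_delta state machine) with a build-then-compare classification: equality with list('accept') for ACCEPTED, a prefix slice comparison for NOT ACCEPTED, otherwise TRAP.
import Mathlib
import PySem

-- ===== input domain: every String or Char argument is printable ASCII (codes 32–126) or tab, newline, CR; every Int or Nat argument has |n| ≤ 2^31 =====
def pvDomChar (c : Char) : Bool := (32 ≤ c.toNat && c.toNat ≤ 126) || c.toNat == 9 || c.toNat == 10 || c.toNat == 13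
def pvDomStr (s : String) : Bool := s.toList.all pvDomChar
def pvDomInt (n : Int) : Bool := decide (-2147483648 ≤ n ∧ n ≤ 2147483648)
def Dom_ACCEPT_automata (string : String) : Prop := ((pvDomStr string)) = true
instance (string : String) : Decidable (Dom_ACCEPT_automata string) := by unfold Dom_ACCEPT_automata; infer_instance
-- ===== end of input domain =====

-- B replaces the streaming DFA-transition loop with a build-then-compare classification
-- (equality with "accept", prefix slice, otherwise trap); objective: simpler.

-- ===== PORT A =====
def TRAP_STATE : Int := -1

def ACCEPT_delta (state : Int) (character : Char) : Int :=
  if state = 0 ∧ character = 'a' then 1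
  else if state = 1 ∧ character = 'c' then 2
  else if state = 2 ∧ character = 'c' then 3
  else if state = 3 ∧ character = 'e' then 4
  else if state = 4 ∧ character = 'p' then 5
  else if state = 5 ∧ character = 't' then 6
  else TRAP_STATE

def ACCEPT_automata (string : String) : String :=
  let finals : List Int := [6]
  let state : Int :=
    string.toList.foldl (fun state character => ACCEPT_delta state character) 0
  if state ∈ finals then "ACCEPTED"
  else if state = TRAP_STATE then "RESULT_TRAP"
  else "NOT ACCEPTED"

-- ===== PORT B =====
def ACCEPT_automata_alt (string : String) : String :=
  let target : List Char := "accept".toList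
  let chars : List Char := string.toList
  if chars = target then "ACCEPTED"
  else if target.take chars.length = chars then "NOT ACCEPTED"
  else "RESULT_TRAP"

-- ===== PRECONDITION & SPEC =====
def Spec_ACCEPT_automata (string : String) (out : String) : Prop := out = ACCEPT_automata_alt string
instance (string : String) (out : String) : Decidable (Spec_ACCEPT_automata string out) := by unfold Spec_ACCEPT_automata; infer_instance

-- ===== CLAIM (what is proved, stated in full; the proofs are below) =====
def Claim_equal_ACCEPT_automata : Prop := ∀ (string : String), Dom_ACCEPT_automata string → Spec_ACCEPT_automata string (ACCEPT_automata string)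

-- ===== LEMMAS AND PROOFS =====

-- After consuming l, A's state is l.length if l is a prefix of "accept", else the trap state -1.
theorem foldl_delta_char (l : List Char) :
    l.foldl (fun state character => ACCEPT_delta state character) 0 =
      if ("accept".toList).take l.length = l then (l.length : Int) else -1 := by
  induction l using List.reverseRecOn with
  | nil => simp
  | append_singleton l c ih =>
    rw [List.foldl_append]
    simp only [List.foldl_cons, List.foldl_nil, ih]
    by_cases hP : ("accept".toList).take l.length = l
    · -- l is a prefix of "accept": its length is ≤ 6
      have hlen : l.length ≤ 6 := by
        have := congrArg List.length hP
        simp at this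
        omega
      rw [if_pos hP]
      interval_cases h : l.length <;>
        simp_all [ACCEPT_delta, TRAP_STATE, List.take_add_one, eq_comm]
    · -- not a prefix: state is trapped, and l ++ [c] is not a prefix either
      have hP' : ¬ ("accept".toList).take (l ++ [c]).length = l ++ [c] := by
        intro h
        apply hP
        have := congrArg (List.take l.length) h
        rwa [List.take_take, List.length_append, List.length_cons,
          min_eq_left (by omega), List.take_left] at this
      rw [if_neg hP, if_neg hP']
      simp [ACCEPT_delta, TRAP_STATE]

-- After the fold, A's classification of the state agrees with B's build-then-compare result.
theorem classify (l : List Char) :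
    (if (if ("accept".toList).take l.length = l then (l.length : Int) else -1) ∈ ([6] : List Int)
       then "ACCEPTED"
     else if (if ("accept".toList).take l.length = l then (l.length : Int) else -1) = TRAP_STATE
       then "RESULT_TRAP" else "NOT ACCEPTED")
    = (if l = "accept".toList then "ACCEPTED"
       else if ("accept".toList).take l.length = l then "NOT ACCEPTED" else "RESULT_TRAP") := by
  by_cases hP : ("accept".toList).take l.length = l
  · have hlen : l.length ≤ 6 := by
      have := congrArg List.length hP
      simp at this
      omega
    rw [if_pos hP]
    by_cases h6 : l.length = 6
    · have hl : l = "accept".toList := by rw [← hP, h6]; rfl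
      simp [hl]
    · have hne : l ≠ "accept".toList := by
        intro h; apply h6; rw [h]; rfl
      have h1 : ((l.length : Int)) ∉ ([6] : List Int) := by
        simp; omega
      have h2 : (l.length : Int) ≠ TRAP_STATE := by
        unfold TRAP_STATE; omega
      rw [if_neg h1, if_neg h2, if_neg hne, if_pos hP]
  · have hne : l ≠ "accept".toList := by
      intro h; apply hP; rw [h]; simp
    rw [if_neg hP]
    have h1 : (-1 : Int) ∉ ([6] : List Int) := by decide
    rw [if_neg h1, if_pos (show (-1 : Int) = TRAP_STATE from rfl), if_neg hne, if_neg hP]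

-- ===== VERDICT (by name: the statement is the Claim_ definition above) =====
theorem ACCEPT_automata_spec : Claim_equal_ACCEPT_automata := by
  intro s _
  show ACCEPT_automata s = ACCEPT_automata_alt s
  unfold ACCEPT_automata ACCEPT_automata_alt
  rw [foldl_delta_char]
  exact classify s.toList
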